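-- pv_equiv track=rewrite | github.com/aviAVIRAL/MY_WORK | DSA/4 array/1 Easy/7_right_rotate_by_Kth_places.py | rotate_by_k_place
-- ===== SOURCE A (Python) =====
-- def rotate_by_k_place(arr, n, k):
--     k = k % n
--     temp = []
--
--     for i in range(0, n-k):
--         temp.append(arr[i])
--
--
--     j = 0
--     for i in range(n-k, n):
--          arr[j] = arr[i]
--          j += 1
--
--
--     j = 0
--     for i in range(k, n):
--         arr[i] = temp[j]
--         j += 1
--
--
--     return arr
-- ===== SOURCE B (Python) =====
-- def rotate_by_k_place(arr, n, k):
--     k = k % n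
--     def _rev(l, r):
--         while l < r:
--             arr[l], arr[r] = arr[r], arr[l]
--             l += 1
--             r -= 1
--     _rev(0, n - 1)
--     _rev(0, k - 1)
--     _rev(k, n - 1)
--     return arr
-- ===== Notes on version B (the rewrite author's own statement) =====
-- stated objective: alternative
-- what changed: Replaced A's temp-buffer rotation (build a copy of the first n-k elements, then two shifting copy loops) by the classic in-place three-reversal rotation (reverse [0,n-1], then [0,k-1], then [k,n-1] with pairwise swaps, O(1) extra space).
import Mathlib
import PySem

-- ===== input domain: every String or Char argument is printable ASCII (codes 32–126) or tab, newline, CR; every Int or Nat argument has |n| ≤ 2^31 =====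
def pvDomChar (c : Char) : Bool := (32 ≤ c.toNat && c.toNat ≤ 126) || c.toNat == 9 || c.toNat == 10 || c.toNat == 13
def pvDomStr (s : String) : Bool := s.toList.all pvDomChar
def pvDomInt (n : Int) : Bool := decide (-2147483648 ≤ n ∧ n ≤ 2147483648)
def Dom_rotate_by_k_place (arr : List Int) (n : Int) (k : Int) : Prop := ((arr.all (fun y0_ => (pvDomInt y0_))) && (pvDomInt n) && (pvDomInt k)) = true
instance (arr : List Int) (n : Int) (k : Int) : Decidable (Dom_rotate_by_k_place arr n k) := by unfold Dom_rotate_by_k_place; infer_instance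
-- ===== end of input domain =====

-- B replaces A's temp-buffer copy (extra list + three copy loops) by the in-place
-- three-reversal rotation (swap loops, O(1) extra space); the equivalence proved here is
-- about the return value only (both Pythons also mutate arr in place, identically).

-- ===== PORT A =====

def rotate_by_k_place (arr : List Int) (n : Int) (k : Int) : List Int :=
  let k2 := PySem.Int.mod k n
  let temp := (PySem.List.pyRange 0 (n - k2) 1).foldl
      (fun t i => t ++ [PySem.List.pyGetD arr i 0]) ([] : List Int)
  let s2 := (PySem.List.pyRange (n - k2) n 1).foldl
      (fun (s : List Int × Int) i =>
        (PySem.List.pySetD s.1 s.2 (PySem.List.pyGetD s.1 i 0), s.2 + 1)) (arr, 0)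
  let s3 := (PySem.List.pyRange k2 n 1).foldl
      (fun (s : List Int × Int) i =>
        (PySem.List.pySetD s.1 i (PySem.List.pyGetD temp s.2 0), s.2 + 1)) (s2.1, 0)
  s3.1

-- ===== PORT B =====
-- the `while l < r: swap; l += 1; r -= 1` helper of Source B
def pvRevLoop (arr : List Int) (l r : Int) : List Int :=
  if h : l < r then
    pvRevLoop
      (PySem.List.pySetD (PySem.List.pySetD arr l (PySem.List.pyGetD arr r 0)) r
        (PySem.List.pyGetD arr l 0)) (l + 1) (r - 1)
  else arr
termination_by (r - l).toNat
decreasing_by omega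

def rotate_by_k_place_alt (arr : List Int) (n : Int) (k : Int) : List Int :=
  let k2 := PySem.Int.mod k n
  pvRevLoop (pvRevLoop (pvRevLoop arr 0 (n - 1)) 0 (k2 - 1)) k2 (n - 1)


-- ===== PRECONDITION & SPEC =====
-- Pre_ excludes exactly the inputs where A raises: n = 0 (ZeroDivisionError in k % n)
-- and n > len(arr) (IndexError reading arr[i] for some i < n).
def Pre_rotate_by_k_place (arr : List Int) (n : Int) (k : Int) : Prop :=
  n ≠ 0 ∧ n ≤ (arr.length : Int)
instance (arr : List Int) (n : Int) (k : Int) : Decidable (Pre_rotate_by_k_place arr n k) := by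
  unfold Pre_rotate_by_k_place; infer_instance

def pvWitness_rotate_by_k_place : List Int × Int × Int := ([1, 2, 3, 4, 5], 5, 2)

def Spec_rotate_by_k_place (arr : List Int) (n : Int) (k : Int) (out : List Int) : Prop :=
  out = rotate_by_k_place_alt arr n k
instance (arr : List Int) (n : Int) (k : Int) (out : List Int) : Decidable (Spec_rotate_by_k_place arr n k out) := by
  unfold Spec_rotate_by_k_place; infer_instance

-- ===== CLAIM (what is proved, stated in full; the proofs are below) =====
def Claim_equal_rotate_by_k_place : Prop := ∀ (arr : List Int) (n : Int) (k : Int), Dom_rotate_by_k_place arr n k → Pre_rotate_by_k_place arr n k → Spec_rotate_by_k_place arr n k (rotate_by_k_place arr n k)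

-- ===== LEMMAS AND PROOFS =====
theorem pvRevLoop_of_le (arr : List Int) (l r : Int) (h : r <= l) : pvRevLoop arr l r = arr := by
  unfold pvRevLoop
  rw [dif_neg (by omega)]

theorem map_getD_range_take (xs : List Int) (m : Nat) (h : m <= xs.length) :
    (List.range m).map (fun t => xs.getD t 0) = xs.take m := by
  apply List.ext_getElem
  . simp [h]
  . intro i h1 h2
    simp at h1 ⊢
    rw [List.getElem?_eq_getElem (show i < xs.length by omega)]
    rfl

theorem set_at_len (A : List Int) (x v : Int) (rest : List Int) :
    (A ++ x :: rest).set A.length v = A ++ v :: rest := by simp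

theorem loop2_inv (arr : List Int) (N K : Nat) (hK : K ≤ N) (hN : N ≤ arr.length) :
    ∀ (c j : Nat), j + c = K →
    (PySem.List.pyRange ((N - K + j : Nat) : Int) ((N : Nat) : Int) 1).foldl
        (fun (s : List Int × Int) i =>
          (PySem.List.pySetD s.1 s.2 (PySem.List.pyGetD s.1 i 0), s.2 + 1))
        (((arr.take N).drop (N - K)).take j ++ arr.drop j, (j : Int))
      = ((arr.take N).drop (N - K) ++ arr.drop K, (K : Int)) := by
  have hW : ((arr.take N).drop (N - K)).length = K := by simp; omega
  intro c
  induction c with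
  | zero =>
    intro j hj
    have hjK : j = K := by omega
    subst hjK
    rw [PySem.List.pyRange_one_eq_nil (by exact_mod_cast Nat.le_of_eq (by omega))]
    rw [List.foldl_nil, List.take_of_length_le (le_of_eq hW)]
  | succ c ih =>
    intro j hj
    have hjK : j < K := by omega
    have hidx : N - K + j < N := by omega
    have hidxlen : N - K + j < arr.length := by omega
    have hlen_take : (((arr.take N).drop (N - K)).take j).length = j := by
      rw [List.length_take, hW]; omega
    rw [PySem.List.pyRange_one_cons (by exact_mod_cast hidx)]
    rw [List.foldl_cons]
    have hget : PySem.List.pyGetD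
        ((((arr.take N).drop (N - K)).take j ++ arr.drop j)) ((N - K + j : Nat) : Int) 0
        = arr[N - K + j]'hidxlen := by
      rw [PySem.List.pyGetD_natCast]
      rw [List.getD_append_right _ _ _ _ (by rw [hlen_take]; omega)]
      rw [hlen_take, show N - K + j - j = N - K by omega]
      rw [List.getD_eq_getElem _ _ (by rw [List.length_drop]; omega)]
      simp only [List.getElem_drop]
      exact getElem_congr rfl (by omega) _
    have hWj : arr[N - K + j]'hidxlen = ((arr.take N).drop (N - K))[j]'(by omega) := by
      simp [List.getElem_drop, List.getElem_take]
    have hset : PySem.List.pySetD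
        (((arr.take N).drop (N - K)).take j ++ arr.drop j) ((j : Nat) : Int)
        (arr[N - K + j]'hidxlen)
        = ((arr.take N).drop (N - K)).take (j + 1) ++ arr.drop (j + 1) := by
      rw [PySem.List.pySetD_natCast]
      rw [List.set_append, if_neg (by rw [hlen_take]; omega), hlen_take, Nat.sub_self]
      rw [List.drop_eq_getElem_cons (show j < arr.length by omega), List.set_cons_zero]
      rw [List.take_add_one, List.getElem?_eq_getElem (by omega), hWj]
      simp
    rw [hget, hset]
    have := ih (j + 1) (by omega)
    rw [show ((N - K + j : Nat) : Int) + 1 = ((N - K + (j + 1) : Nat) : Int) by push_cast; ring] at *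
    rw [show ((j : Nat) : Int) + 1 = ((j + 1 : Nat) : Int) by push_cast; ring]
    exact this

theorem loop3_inv (arr temp : List Int) (N K : Nat) (hK : K ≤ N) (hN : N ≤ arr.length)
    (htemp : temp = arr.take (N - K)) :
    ∀ (c j : Nat), j + c = N - K →
    (PySem.List.pyRange ((K + j : Nat) : Int) ((N : Nat) : Int) 1).foldl
        (fun (s : List Int × Int) i =>
          (PySem.List.pySetD s.1 i (PySem.List.pyGetD temp s.2 0), s.2 + 1))
        ((arr.take N).drop (N - K) ++ temp.take j ++ arr.drop (K + j), (j : Int))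
      = ((arr.take N).drop (N - K) ++ temp ++ arr.drop N, ((N - K : Nat) : Int)) := by
  have hW : ((arr.take N).drop (N - K)).length = K := by simp; omega
  have htl : temp.length = N - K := by rw [htemp]; simp; omega
  intro c
  induction c with
  | zero =>
    intro j hj
    have hjK : j = N - K := by omega
    subst hjK
    rw [PySem.List.pyRange_one_eq_nil (by exact_mod_cast Nat.le_of_eq (by omega))]
    rw [List.foldl_nil, List.take_of_length_le (le_of_eq htl)]
    rw [show K + (N - K) = N by omega]
  | succ c ih =>
    intro j hj
    have hjK : j < N - K := by omega
    have hidx : K + j < N := by omega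
    have hlen_take : (temp.take j).length = j := by rw [List.length_take, htl]; omega
    rw [PySem.List.pyRange_one_cons (by exact_mod_cast hidx)]
    rw [List.foldl_cons]
    have hgetv : PySem.List.pyGetD temp ((j : Nat) : Int) 0 = temp[j]'(by omega) := by
      rw [PySem.List.pyGetD_natCast]
      exact List.getD_eq_getElem _ _ (by omega)
    have hset : PySem.List.pySetD
        ((arr.take N).drop (N - K) ++ temp.take j ++ arr.drop (K + j)) ((K + j : Nat) : Int)
        (temp[j]'(by omega))
        = (arr.take N).drop (N - K) ++ temp.take (j + 1) ++ arr.drop (K + (j + 1)) := by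
      rw [PySem.List.pySetD_natCast]
      rw [List.append_assoc, List.set_append, if_neg (by rw [hW]; omega), hW,
        show K + j - K = j by omega]
      rw [List.set_append, if_neg (by rw [hlen_take]; omega), hlen_take, Nat.sub_self]
      rw [List.drop_eq_getElem_cons (show K + j < arr.length by omega), List.set_cons_zero]
      rw [show K + j + 1 = K + (j + 1) by omega]
      rw [List.take_add_one (i := j), List.getElem?_eq_getElem (show j < temp.length by omega)]
      simp only [Option.toList_some, List.append_assoc, List.singleton_append]
    rw [hgetv, hset]
    have := ih (j + 1) (by omega)
    rw [show ((K + j : Nat) : Int) + 1 = ((K + (j + 1) : Nat) : Int) by push_cast; ring] at *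
    rw [show ((j : Nat) : Int) + 1 = ((j + 1 : Nat) : Int) by push_cast; ring]
    exact this


theorem getD_at_len (A : List Int) (x : Int) (rest : List Int) :
    (A ++ x :: rest).getD A.length 0 = x := by simp

theorem pvRev_core (M A C : List Int) :
    pvRevLoop (A ++ M ++ C) (A.length : Int) ((A.length : Int) + M.length - 1)
      = A ++ M.reverse ++ C := by
  induction hn : M.length using Nat.strong_induction_on generalizing M A C with
  | _ n ih => ?_
  subst hn
  rcases M.eq_nil_or_concat with hM | ⟨mid', y, hM⟩
  · subst hM
    simp only [List.length_nil, Nat.cast_zero, add_zero, List.append_nil, List.reverse_nil]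
    exact pvRevLoop_of_le _ _ _ (by omega)
  rcases mid' with _ | ⟨x, mid⟩
  · simp only [List.concat_eq_append, List.nil_append] at hM
    subst hM
    rw [show ((A.length : Int) + ([y] : List Int).length - 1) = (A.length : Int) by simp]
    rw [pvRevLoop_of_le _ _ _ le_rfl]
    simp
  · simp only [List.concat_eq_append] at hM
    subst hM
    have hr : (A.length : Int) + ((x :: mid) ++ [y]).length - 1
        = ((A.length + mid.length + 1 : Nat) : Int) := by push_cast; simp; ring
    have hget1 : PySem.List.pyGetD (A ++ ((x :: mid) ++ [y]) ++ C) (A.length : Int) 0 = x := by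
      rw [PySem.List.pyGetD_natCast]
      rw [show A ++ ((x :: mid) ++ [y]) ++ C = A ++ x :: (mid ++ y :: C) by simp]
      exact getD_at_len A x _
    have hget2 : PySem.List.pyGetD (A ++ ((x :: mid) ++ [y]) ++ C)
        ((A.length + mid.length + 1 : Nat) : Int) 0 = y := by
      rw [PySem.List.pyGetD_natCast]
      rw [show A ++ ((x :: mid) ++ [y]) ++ C = (A ++ x :: mid) ++ y :: C by simp]
      rw [show A.length + mid.length + 1 = (A ++ x :: mid).length by simp; omega]
      exact getD_at_len _ y _
    have hswap :
        PySem.List.pySetD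
          (PySem.List.pySetD (A ++ ((x :: mid) ++ [y]) ++ C) (A.length : Int) y)
          ((A.length + mid.length + 1 : Nat) : Int) x
        = (A ++ [y]) ++ mid ++ ([x] ++ C) := by
      rw [PySem.List.pySetD_natCast, PySem.List.pySetD_natCast]
      rw [show A ++ ((x :: mid) ++ [y]) ++ C = A ++ x :: (mid ++ y :: C) by simp]
      rw [set_at_len]
      rw [show A ++ y :: (mid ++ y :: C) = (A ++ y :: mid) ++ y :: C by simp]
      rw [show A.length + mid.length + 1 = (A ++ y :: mid).length by simp; omega]
      rw [set_at_len]
      simp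
    unfold pvRevLoop
    rw [dif_pos (by simp; omega)]
    rw [hr, hget1, hget2, hswap]
    have hl' : (A.length : Int) + 1 = ((A ++ [y]).length : Int) := by simp
    have hr' : ((A.length + mid.length + 1 : Nat) : Int) - 1
        = (((A ++ [y]).length : Int)) + (mid.length : Int) - 1 := by push_cast; simp; ring
    rw [hl', hr', ih mid.length (by simp) mid (A ++ [y]) ([x] ++ C) rfl]
    simp

theorem pvRev_core_nil (M C : List Int) :
    pvRevLoop (M ++ C) 0 ((M.length : Int) - 1) = M.reverse ++ C := by
  have := pvRev_core M [] C
  simpa using this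

theorem portA_pos (arr : List Int) (n k : Int) (N K : Nat) (hn : n = (N : Int))
    (hk : PySem.Int.mod k n = (K : Int)) (hKN : K < N) (hN : N ≤ arr.length) :
    rotate_by_k_place arr n k
      = (arr.take N).drop (N - K) ++ arr.take (N - K) ++ arr.drop N := by
  simp only [rotate_by_k_place, hk]
  have e1 : n - (K : Int) = ((N - K : Nat) : Int) := by omega
  have etemp : (PySem.List.pyRange 0 (n - (K : Int)) 1).foldl
      (fun t i => t ++ [PySem.List.pyGetD arr i 0]) ([] : List Int) = arr.take (N - K) := by
    rw [e1, PySem.List.foldl_append_singleton_eq_map, PySem.List.pyRange_zero_nat]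
    rw [List.map_map]
    have : ((fun i => PySem.List.pyGetD arr i 0) ∘ fun (t : Nat) => (t : Int))
        = fun t => arr.getD t 0 := by
      funext t; simp [PySem.List.pyGetD_natCast]
    rw [this, map_getD_range_take arr (N - K) (by omega)]
    simp
  rw [etemp]
  have h2 := loop2_inv arr N K (le_of_lt hKN) hN K 0 (by omega)
  simp only [List.take_zero, List.nil_append, List.drop_zero, Nat.add_zero, Nat.cast_zero] at h2
  rw [e1, hn] at *
  rw [h2]
  have h3 := loop3_inv arr (arr.take (N - K)) N K (le_of_lt hKN) hN rfl (N - K) 0 (by omega)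
  simp only [List.take_zero, List.append_nil, Nat.add_zero, Nat.cast_zero] at h3
  rw [h3]

theorem portB_pos (arr : List Int) (n k : Int) (N K : Nat) (hn : n = (N : Int))
    (hk : PySem.Int.mod k n = (K : Int)) (hKN : K < N) (hN : N ≤ arr.length) :
    rotate_by_k_place_alt arr n k
      = (arr.take N).drop (N - K) ++ arr.take (N - K) ++ arr.drop N := by
  simp only [rotate_by_k_place_alt, hk]
  have hTlen : (arr.take N).length = N := by simp [hN]
  have hRlen : (arr.take N).reverse.length = N := by simp [hN]
  -- step 1
  have s1 : pvRevLoop arr 0 (n - 1) = (arr.take N).reverse ++ arr.drop N := by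
    have := pvRev_core_nil (arr.take N) (arr.drop N)
    rw [List.take_append_drop, hTlen] at this
    rw [hn]
    exact this
  rw [s1]
  -- step 2
  have hPlen : ((arr.take N).reverse.take K).length = K := by
    rw [List.length_take, hRlen]; omega
  have s2 : pvRevLoop ((arr.take N).reverse ++ arr.drop N) 0 ((K : Int) - 1)
      = ((arr.take N).reverse.take K).reverse ++ ((arr.take N).reverse.drop K ++ arr.drop N) := by
    have := pvRev_core_nil ((arr.take N).reverse.take K)
        ((arr.take N).reverse.drop K ++ arr.drop N)
    rw [hPlen] at this
    rw [show (arr.take N).reverse.take K ++ ((arr.take N).reverse.drop K ++ arr.drop N)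
        = (arr.take N).reverse ++ arr.drop N by rw [← List.append_assoc, List.take_append_drop]] at this
    exact this
  rw [s2]
  -- step 3
  have hPlen' : (((arr.take N).reverse.take K).reverse).length = K := by simp [hPlen]
  have hQlen : ((arr.take N).reverse.drop K).length = N - K := by
    rw [List.length_drop, hRlen]
  have s3 := pvRev_core ((arr.take N).reverse.drop K) (((arr.take N).reverse.take K).reverse)
      (arr.drop N)
  rw [hPlen', hQlen] at s3
  rw [show ((K : Nat) : Int) + ((N - K : Nat) : Int) - 1 = n - 1 by omega] at s3
  rw [← List.append_assoc, s3]
  -- identities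
  congr 1
  congr 1
  · rw [List.take_reverse, hTlen, List.reverse_reverse]
  · rw [List.drop_reverse, hTlen, List.reverse_reverse, List.take_take]
    congr 1
    omega

theorem portA_neg (arr : List Int) (n k : Int) (h : n < 0) :
    rotate_by_k_place arr n k = arr := by
  have hb := PySem.Int.mod_neg_bounds k h
  simp only [rotate_by_k_place]
  rw [PySem.List.pyRange_one_eq_nil (by omega), PySem.List.pyRange_one_eq_nil (by omega),
    PySem.List.pyRange_one_eq_nil (by omega)]
  simp

theorem portB_neg (arr : List Int) (n k : Int) (h : n < 0) :
    rotate_by_k_place_alt arr n k = arr := by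
  have hb := PySem.Int.mod_neg_bounds k h
  simp only [rotate_by_k_place_alt]
  rw [pvRevLoop_of_le _ _ _ (by omega), pvRevLoop_of_le _ _ _ (by omega),
    pvRevLoop_of_le _ _ _ (by omega)]

theorem main_equal (arr : List Int) (n k : Int) (hn0 : n ≠ 0) (hnlen : n ≤ (arr.length : Int)) :
    rotate_by_k_place arr n k = rotate_by_k_place_alt arr n k := by
  rcases lt_trichotomy n 0 with hneg | h0 | hpos
  · rw [portA_neg arr n k hneg, portB_neg arr n k hneg]
  · exact absurd h0 hn0
  · have hn : n = (n.toNat : Int) := (Int.toNat_of_nonneg (le_of_lt hpos)).symm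
    have hk : PySem.Int.mod k n = ((PySem.Int.mod k n).toNat : Int) :=
      (Int.toNat_of_nonneg (PySem.Int.mod_nonneg k hpos)).symm
    have hKN : (PySem.Int.mod k n).toNat < n.toNat := by
      have := PySem.Int.mod_lt k hpos
      omega
    have hN : n.toNat ≤ arr.length := by omega
    rw [portA_pos arr n k n.toNat (PySem.Int.mod k n).toNat hn hk hKN hN,
      portB_pos arr n k n.toNat (PySem.Int.mod k n).toNat hn hk hKN hN]

-- ===== VERDICT (by name: the statement is the Claim_ definition above) =====
theorem rotate_by_k_place_spec : Claim_equal_rotate_by_k_place := by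
  intro arr n k _ hpre
  unfold Spec_rotate_by_k_place
  exact main_equal arr n k hpre.1 hpre.2
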